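-- pv_equiv track=rewrite | github.com/wjmallard/MeshCell | Skeleton.py | extract_branches
-- ===== SOURCE A (Python) =====
-- from collections import defaultdict
--
-- def extract_branches(E):
--
--     # Build a connectivity graph of all edges in the contour's interior.
--     #
--     # Use a dictionary where:
--     #   - key: vertex index
--     #   - val: list of vertex indices
--     # These all index into V.
--     Neighbors = defaultdict(list)
--
--     for u, v in E:
--
--         # Connect vertex u to v and v to u.
--         Neighbors[u].append(v)
--         Neighbors[v].append(u)
--
--     # Build a list of all non-branching edges.
--     #
--     # Find all leaf nodes. Pick any one of them and start walking.
--     #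
--     # No need to check for:
--     #   - cycles because Voronoi diagrams are acyclic.
--     #   - disjoint subgraphs because Voronoi diagrams are fully connected.
--     Leaves = [k for k, v in Neighbors.items() if len(v) == 1]
--     root = Leaves[0]
--
--     Branches = []
--     vertices_to_walk = []
--
--     # Start at a leaf node.
--     # Push the first two nodes onto the stack.
--     this_v = root
--     next_v = Neighbors[this_v].pop()
--     Neighbors[next_v].remove(this_v)
--     vertices_to_walk.append([this_v, next_v])
--
--     # Walk the tree.
--     while vertices_to_walk:
--
--         # Start a new branch.
--         branch = vertices_to_walk.pop()
--         next_v = branch.pop()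
--
--         # Add vertices until we hit a fork.
--         while len(Neighbors[next_v]) == 1:
--
--             # Advance to next vertex.
--             this_v = next_v
--             next_v = Neighbors[this_v].pop()
--
--             # Add this vertex to the branch.
--             branch.append(this_v)
--
--             # Remove this vertex from the
--             # next vertex's neighbor list.
--             Neighbors[next_v].remove(this_v)
--
--         # Finish the branch.
--         branch.append(next_v)
--         Branches.append(branch)
--
--         # Add the final vertex's neighbors
--         # to the list of vertices to walk.
--         while Neighbors[next_v]:
--             n = Neighbors[next_v].pop()
--             Neighbors[n].remove(next_v)
--             vertices_to_walk.append([next_v, n])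
--
--     return Branches
-- ===== SOURCE B (Python) =====
-- def extract_branches(E):
--     # Recursive edge-path decomposition: a plain dict built with setdefault, the
--     # first degree-1 vertex as root, and recursion at forks instead of A's
--     # explicit vertices_to_walk stack; each branch is emitted during the walk.
--     nbrs = {}
--     for u, v in E:
--         nbrs.setdefault(u, []).append(v)
--         nbrs.setdefault(v, []).append(u)
--
--     root = next(k for k, l in nbrs.items() if len(l) == 1)
--     branches = []
--
--     def walk(t, v):
--         # follow the non-branching chain starting with the consumed edge t-v
--         branch = [t]
--         while len(nbrs[v]) == 1:
--             w = nbrs[v][0]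
--             nbrs[v] = []
--             branch.append(v)
--             nbrs[w].remove(v)
--             v = w
--         branch.append(v)
--         branches.append(branch)
--         fork(v)
--
--     def fork(v):
--         # consume the fork's remaining edges (back to front), then walk the
--         # children on unwind, which restores front-to-back order
--         if nbrs[v]:
--             n = nbrs[v].pop()
--             nbrs[n].remove(v)
--             fork(v)
--             walk(v, n)
--
--     nv = nbrs[root][0]
--     nbrs[root] = []
--     nbrs[nv].remove(root)
--     walk(root, nv)
--     return branches
-- ===== Notes on version B (the rewrite author's own statement) =====
-- stated objective: alternative
-- what changed: A's explicit vertices_to_walk stack machine is replaced by a mutually recursive walk/fork pair: walk emits one non-branching chain, fork pops the endpoint's remaining edges recursively and walks each child on unwind, reproducing A's LIFO order; the adjacency dict is built with setdefault and the root taken via next() over a generator.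
import Mathlib
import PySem

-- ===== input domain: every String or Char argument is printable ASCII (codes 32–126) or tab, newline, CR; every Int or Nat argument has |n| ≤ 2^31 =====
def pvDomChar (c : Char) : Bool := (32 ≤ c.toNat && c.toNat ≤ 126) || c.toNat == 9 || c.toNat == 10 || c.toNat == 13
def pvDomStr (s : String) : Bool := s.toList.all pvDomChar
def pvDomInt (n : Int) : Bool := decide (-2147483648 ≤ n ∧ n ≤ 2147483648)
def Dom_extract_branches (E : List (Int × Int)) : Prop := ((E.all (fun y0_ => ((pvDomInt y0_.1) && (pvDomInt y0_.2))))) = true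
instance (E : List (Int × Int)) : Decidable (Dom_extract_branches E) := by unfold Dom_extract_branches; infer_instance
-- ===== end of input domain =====

-- B replaces A's explicit vertices_to_walk stack by a mutually recursive walk/fork pair
-- (recursion at the forks; each fork edge is popped before the deeper recursion and the
-- child is walked on unwind); objective: alternative decomposition, same cost.
-- Both programs' loops are ported with a fuel parameter that provably exceeds the number
-- of steps (each step consumes adjacency entries), so the fuel-0 branches are never taken.

-- ===== PORT A =====

-- total number of stored adjacency entries; bounds the number of walk steps (fuel only)
def pvDsize (d : PySem.Dict Int (List Int)) : Nat := (d.items.map (fun p => p.2.length)).sum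

-- `Neighbors[u].append(v); Neighbors[v].append(u)` over all edges (defaultdict(list))
def pvBuild (E : List (Int × Int)) : PySem.Dict Int (List Int) :=
  E.foldl (fun d uv => (d.modify uv.1 [] (· ++ [uv.2])).modify uv.2 [] (· ++ [uv.1]))
    PySem.Dict.empty

-- `[k for k, v in Neighbors.items() if len(v) == 1]`
def pvLeaves (d : PySem.Dict Int (List Int)) : List Int :=
  (d.items.filter (fun kv => kv.2.length == 1)).map (·.1)

-- `Neighbors[k].remove(x)`; the `none` branch (Python: ValueError) keeps d — it is
-- unreachable from the symmetric adjacency states both programs actually produce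
def removeEdgeD (d : PySem.Dict Int (List Int)) (k x : Int) : PySem.Dict Int (List Int) :=
  match PySem.List.remove? (d.getD k []) x with
  | some l => d.insert k l
  | none => d

-- A's inner `while len(Neighbors[next_v]) == 1` chain walk: pop the sole neighbour,
-- append this_v, remove the back-edge; fuel ≥ pvDsize never runs out
def chainF : Nat → PySem.Dict Int (List Int) → List Int → Int →
    List Int × Int × PySem.Dict Int (List Int)
  | 0, d, branch, next => (branch ++ [next], next, d)
  | fuel + 1, d, branch, next =>
      if (d.getD next []).length = 1 then
        match PySem.List.pop? (d.getD next []) with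
        | some tn => chainF fuel (removeEdgeD (d.insert next tn.2) tn.1 next)
            (branch ++ [next]) tn.1
        | none => (branch ++ [next], next, d)  -- unreachable: a length-1 list always pops
      else (branch ++ [next], next, d)

-- A's `while Neighbors[next_v]: pop/remove` fork consumption; returns the popped
-- neighbours in pop order; each iteration consumes an entry
def forkPopF : Nat → PySem.Dict Int (List Int) → Int →
    List Int × PySem.Dict Int (List Int)
  | 0, d, _ => ([], d)
  | fuel + 1, d, e =>
      match PySem.List.pop? (d.getD e []) with
      | none => ([], d)
      | some nl =>
          match forkPopF fuel (removeEdgeD (d.insert e nl.2) nl.1 e) e with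
          | (cs, d2) => (nl.1 :: cs, d2)

-- A's setup: adjacency build, Leaves[0], consumption of the first edge;
-- `none` ↔ Python raises IndexError on `Leaves[0]` (no degree-1 vertex)
def initStateF (E : List (Int × Int)) :
    Option (Int × Int × PySem.Dict Int (List Int)) :=
  match pvLeaves (pvBuild E) with
  | [] => none
  | root :: _ =>
      match PySem.List.pop? ((pvBuild E).getD root []) with
      | none => none  -- unreachable: a leaf's list has length 1
      | some p => some (root, p.1, removeEdgeD ((pvBuild E).insert root p.2) p.1 root)

-- A's outer `while vertices_to_walk:` loop; the Lean list's head is the Python stack's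
-- top; each iteration consumes an entry or shortens the stack, so fuel ≥ pvDsize + 1
-- never runs out
def loopAF : Nat → PySem.Dict Int (List Int) → List (Int × Int) → List (List Int)
  | 0, _, _ => []
  | fuel + 1, d, stack =>
      match stack with
      | [] => []
      | tn :: rest =>
          let c := chainF (fuel + 1) d [tn.1] tn.2
          let f := forkPopF (fuel + 1) c.2.2 c.2.1
          c.1 :: loopAF fuel f.2 (f.1.reverse.map (fun x => (c.2.1, x)) ++ rest)

def extract_branches (E : List (Int × Int)) : List (List Int) :=
  match initStateF E with
  | none => []  -- Python raises IndexError here; excluded by Pre_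
  | some s => loopAF (pvDsize s.2.2 + 1) s.2.2 [(s.1, s.2.1)]

-- ===== PORT B =====

-- `nbrs.setdefault(u, []).append(v); nbrs.setdefault(v, []).append(u)`, one edge at a time
def bBuild : List (Int × Int) → PySem.Dict Int (List Int) → PySem.Dict Int (List Int)
  | [], d => d
  | (u, v) :: es, d =>
      bBuild es ((d.modify u [] (fun l => l ++ [v])).modify v [] (fun l => l ++ [u]))

-- `next(k for k, l in nbrs.items() if len(l) == 1)`; none ↔ Python raises StopIteration
def bRoot (d : PySem.Dict Int (List Int)) : Option Int :=
  (d.items.find? (fun kv => kv.2.length == 1)).map (fun kv => kv.1)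

-- `walk`'s chain loop: `w = nbrs[v][0]; nbrs[v] = []; branch.append(v); nbrs[w].remove(v)`
def bChain : Nat → PySem.Dict Int (List Int) → List Int → Int →
    List Int × Int × PySem.Dict Int (List Int)
  | 0, d, br, v => (br ++ [v], v, d)
  | fuel + 1, d, br, v =>
      match d.getD v [] with
      | [w] => bChain fuel (removeEdgeD (d.insert v []) w v) (br ++ [v]) w
      | _ => (br ++ [v], v, d)

mutual
  -- `walk(t, v)`: collect the branch along the chain, emit it, handle the fork
  def bWalk : Nat → PySem.Dict Int (List Int) → Int → Int →
      List (List Int) × PySem.Dict Int (List Int)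
    | 0, d, _, _ => ([], d)
    | fuel + 1, d, t, v =>
        let c := bChain (fuel + 1) d [t] v
        let r := bFork fuel c.2.2 c.2.1
        (c.1 :: r.1, r.2)

  -- `fork(v)`: pop one edge, recurse on the remaining ones, walk the popped child last
  def bFork : Nat → PySem.Dict Int (List Int) → Int →
      List (List Int) × PySem.Dict Int (List Int)
    | 0, d, _ => ([], d)
    | fuel + 1, d, v =>
        match PySem.List.pop? (d.getD v []) with
        | none => ([], d)
        | some nl =>
            let r := bFork fuel (removeEdgeD (d.insert v nl.2) nl.1 v) v
            let w := bWalk fuel r.2 v nl.1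
            (r.1 ++ w.1, w.2)
end

def extract_branches_alt (E : List (Int × Int)) : List (List Int) :=
  match bRoot (bBuild E PySem.Dict.empty) with
  | none => []  -- Python raises StopIteration here; excluded by Pre_
  | some r =>
      match (bBuild E PySem.Dict.empty).getD r [] with
      | [nv] =>
          (bWalk
            (2 * pvDsize (removeEdgeD ((bBuild E PySem.Dict.empty).insert r []) nv r) + 1)
            (removeEdgeD ((bBuild E PySem.Dict.empty).insert r []) nv r) r nv).1
      | _ => []  -- unreachable: the chosen root has exactly one neighbour

-- ===== PRECONDITION & SPEC =====
-- Pre_: some vertex has degree 1 (a leaf exists); otherwise A's `Leaves[0]` raises IndexError.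
def Pre_extract_branches (E : List (Int × Int)) : Prop :=
  ∃ x ∈ E.flatMap (fun p => [p.1, p.2]),
    (E.flatMap (fun p => [p.1, p.2])).count x = 1
instance (E : List (Int × Int)) : Decidable (Pre_extract_branches E) := by
  unfold Pre_extract_branches; infer_instance

def pvWitness_extract_branches : (List (Int × Int)) := [(1, 2), (2, 3)]

def Spec_extract_branches (E : List (Int × Int)) (out : List (List Int)) : Prop :=
  out = extract_branches_alt E
instance (E : List (Int × Int)) (out : List (List Int)) : Decidable (Spec_extract_branches E out) := by
  unfold Spec_extract_branches; infer_instance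

-- ===== CLAIM (what is proved, stated in full; the proofs are below) =====
def Claim_equal_extract_branches : Prop := ∀ (E : List (Int × Int)), Dom_extract_branches E → Pre_extract_branches E → Spec_extract_branches E (extract_branches E)

-- ===== LEMMAS AND PROOFS =====

lemma nodup_keys_modify {d : PySem.Dict Int (List Int)} (k : Int) (d0 : List Int)
    (f : List Int → List Int) (h : d.keys.Nodup) : (d.modify k d0 f).keys.Nodup := by
  rw [PySem.Dict.keys_modify]
  exact PySem.Dict.nodup_keys_insert _ _ _ h

lemma nodup_keys_build_aux (E : List (Int × Int)) (d : PySem.Dict Int (List Int))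
    (h : d.keys.Nodup) :
    (E.foldl (fun d uv => (d.modify uv.1 [] (· ++ [uv.2])).modify uv.2 [] (· ++ [uv.1])) d).keys.Nodup := by
  induction E generalizing d with
  | nil => exact h
  | cons uv E ih =>
      exact ih _ (nodup_keys_modify _ _ _ (nodup_keys_modify _ _ _ h))

lemma nodup_keys_build (E : List (Int × Int)) : (pvBuild E).keys.Nodup :=
  nodup_keys_build_aux E PySem.Dict.empty (PySem.Dict.nodup_keys_empty)

lemma nodup_removeEdgeD (d : PySem.Dict Int (List Int)) (k x : Int)
    (h : d.keys.Nodup) : (removeEdgeD d k x).keys.Nodup := by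
  unfold removeEdgeD
  cases PySem.List.remove? (d.getD k []) x with
  | none => exact h
  | some l => exact PySem.Dict.nodup_keys_insert _ _ _ h

lemma sum_replace (l : List (Int × List Int)) (k : Int) (v w : List Int)
    (hnd : (l.map (·.1)).Nodup) (hm : (k, w) ∈ l) :
    ((l.map (fun p => if (p.1 == k) = true then (k, v) else p)).map (fun p => p.2.length)).sum
      + w.length
    = (l.map (fun p => p.2.length)).sum + v.length := by
  induction l with
  | nil => cases hm
  | cons a l ih =>
      simp only [List.map_cons, List.nodup_cons, List.mem_map] at hnd
      rcases List.mem_cons.mp hm with h | hm2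
      · subst h
        have hmap : (l.map (fun p => if (p.1 == k) = true then (k, v) else p)) = l := by
          have hid := List.map_congr_left (l := l)
            (f := fun p : Int × List Int => if (p.1 == k) = true then (k, v) else p) (g := id)
            (fun p hp => by
              have hnk : p.1 ≠ k := fun hk => hnd.1 ⟨p, hp, hk⟩
              simp [hnk])
          simpa using hid
        simp only [List.map_cons, hmap, List.sum_cons]
        simp
        omega
      · have hak : a.1 ≠ k := by
          intro hk
          exact hnd.1 ⟨(k, w), hm2, by simp [hk]⟩
        have hif : (if (a.1 == k) = true then (k, v) else a) = a := by simp [hak]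
        simp only [List.map_cons, List.sum_cons, hif]
        have := ih hnd.2 hm2
        omega

lemma dsize_insert_of_get? (d : PySem.Dict Int (List Int)) (hnd : d.keys.Nodup)
    (k : Int) (v w : List Int) (hw : d.get? k = some w) :
    pvDsize (d.insert k v) + w.length = pvDsize d + v.length := by
  have hc : d.contains k = true := by
    rw [PySem.Dict.contains_eq_isSome_get?, hw]; rfl
  have hmem : (k, w) ∈ d.items := PySem.Dict.mem_items_of_get?_eq_some d hw
  unfold pvDsize
  rw [PySem.Dict.items_insert_of_contains d v hc]
  exact sum_replace d.items k v w hnd hmem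

lemma get?_of_getD_ne (d : PySem.Dict Int (List Int)) (k : Int)
    (h : d.getD k [] ≠ []) : d.get? k = some (d.getD k []) := by
  cases hc : d.contains k with
  | false => exact absurd (PySem.Dict.getD_of_not_contains d [] hc) h
  | true =>
      rw [PySem.Dict.contains_eq_isSome_get?] at hc
      rcases Option.isSome_iff_exists.mp hc with ⟨w, hw⟩
      rw [PySem.Dict.getD_of_get?_eq_some d [] hw]
      exact hw

lemma dsize_insert_lt (d : PySem.Dict Int (List Int)) (hnd : d.keys.Nodup)
    (k : Int) (v : List Int) (h : v.length < (d.getD k []).length) :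
    pvDsize (d.insert k v) < pvDsize d := by
  have hne : d.getD k [] ≠ [] := by
    intro h0; rw [h0] at h; simp at h
  have := dsize_insert_of_get? d hnd k v _ (get?_of_getD_ne d k hne)
  omega

lemma dsize_removeEdgeD_le (d : PySem.Dict Int (List Int)) (hnd : d.keys.Nodup)
    (k x : Int) : pvDsize (removeEdgeD d k x) ≤ pvDsize d := by
  unfold removeEdgeD
  cases hr : PySem.List.remove? (d.getD k []) x with
  | none => exact le_refl _
  | some l =>
      have hx : x ∈ d.getD k [] := by
        by_contra hx
        rw [(PySem.List.remove?_eq_none_iff _ _).mpr hx] at hr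
        cases hr
      have hl : l = (d.getD k []).erase x := by
        rw [PySem.List.remove?_eq_some_erase _ x hx] at hr
        exact (Option.some.injEq _ _).mp hr |>.symm ▸ rfl
      have hlen : l.length < (d.getD k []).length := by
        rw [hl, List.length_erase_of_mem hx]
        have : (d.getD k []).length ≠ 0 := by
          intro h0
          rw [List.length_eq_zero_iff] at h0
          rw [h0] at hx; cases hx
        omega
      exact le_of_lt (dsize_insert_lt d hnd k l hlen)

lemma getD_length_le_dsize (d : PySem.Dict Int (List Int)) (k : Int) :
    (d.getD k []).length ≤ pvDsize d := by
  cases hc : d.contains k with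
  | false => rw [PySem.Dict.getD_of_not_contains d [] hc]; exact Nat.zero_le _
  | true =>
      rw [PySem.Dict.contains_eq_isSome_get?] at hc
      rcases Option.isSome_iff_exists.mp hc with ⟨w, hw⟩
      rw [PySem.Dict.getD_of_get?_eq_some d [] hw]
      have hmem : (k, w) ∈ d.items := PySem.Dict.mem_items_of_get?_eq_some d hw
      exact List.le_sum_of_mem (List.mem_map_of_mem hmem)

-- the one-step state update of the chain walk / fork loops (shared in both programs)
lemma chain_step_facts (d : PySem.Dict Int (List Int)) (hnd : d.keys.Nodup)
    (k : Int) {tn : Int × List Int}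
    (hp : PySem.List.pop? (d.getD k []) = some tn) :
    pvDsize (removeEdgeD (d.insert k tn.2) tn.1 k) < pvDsize d ∧
    (removeEdgeD (d.insert k tn.2) tn.1 k).keys.Nodup := by
  have h2 := PySem.List.length_of_pop?_eq_some _ hp
  have hnd1 : (d.insert k tn.2).keys.Nodup := PySem.Dict.nodup_keys_insert _ _ _ hnd
  refine ⟨lt_of_le_of_lt (dsize_removeEdgeD_le _ hnd1 _ _)
    (dsize_insert_lt d hnd k tn.2 (by omega)), nodup_removeEdgeD _ _ _ hnd1⟩

-- === chainF: fuel irrelevance, dsize monotonicity, Nodup preservation ===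

lemma chainF_mono : ∀ (fuel : Nat) (d : PySem.Dict Int (List Int)) (b : List Int)
    (nx : Int), d.keys.Nodup →
    pvDsize (chainF fuel d b nx).2.2 ≤ pvDsize d ∧ (chainF fuel d b nx).2.2.keys.Nodup := by
  intro fuel
  induction fuel with
  | zero => intro d b nx hnd; exact ⟨le_refl _, hnd⟩
  | succ f ih =>
      intro d b nx hnd
      rw [chainF]
      split_ifs with h1
      · cases hp : PySem.List.pop? (d.getD nx []) with
        | none => exact ⟨le_refl _, hnd⟩
        | some tn =>
            have hs := chain_step_facts d hnd nx hp
            have := ih _ (b ++ [nx]) tn.1 hs.2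
            exact ⟨le_trans this.1 (le_of_lt hs.1), this.2⟩
      · exact ⟨le_refl _, hnd⟩

lemma chainF_fuel_inv : ∀ (f1 f2 : Nat) (d : PySem.Dict Int (List Int)) (b : List Int)
    (nx : Int), d.keys.Nodup → pvDsize d ≤ f1 → pvDsize d ≤ f2 →
    chainF f1 d b nx = chainF f2 d b nx := by
  intro f1
  induction f1 with
  | zero =>
      intro f2 d b nx hnd h1 h2
      have hz : (d.getD nx []).length ≠ 1 := by
        have := getD_length_le_dsize d nx
        omega
      cases f2 with
      | zero => rfl
      | succ g => rw [chainF, chainF, if_neg hz]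
  | succ f ih =>
      intro f2 d b nx hnd h1 h2
      cases f2 with
      | zero =>
          have hz : (d.getD nx []).length ≠ 1 := by
            have := getD_length_le_dsize d nx
            omega
          rw [chainF, chainF, if_neg hz]
      | succ g =>
          rw [chainF, chainF]
          split_ifs with hg
          · cases hp : PySem.List.pop? (d.getD nx []) with
            | none => rfl
            | some tn =>
                have hs := chain_step_facts d hnd nx hp
                exact ih g _ (b ++ [nx]) tn.1 hs.2 (by omega) (by omega)
          · rfl

-- === forkPopF: fuel irrelevance, dsize accounting, Nodup preservation ===

lemma forkPopF_mono : ∀ (fuel : Nat) (d : PySem.Dict Int (List Int)) (e : Int),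
    d.keys.Nodup →
    pvDsize (forkPopF fuel d e).2 + (forkPopF fuel d e).1.length ≤ pvDsize d ∧
    (forkPopF fuel d e).2.keys.Nodup := by
  intro fuel
  induction fuel with
  | zero => intro d e hnd; exact ⟨by simp [forkPopF], by simp [forkPopF, hnd]⟩
  | succ f ih =>
      intro d e hnd
      rw [forkPopF]
      cases hp : PySem.List.pop? (d.getD e []) with
      | none => exact ⟨by simp, hnd⟩
      | some nl =>
          have hs := chain_step_facts d hnd e hp
          have hr := ih _ e hs.2
          dsimp only
          cases hq : forkPopF f (removeEdgeD (d.insert e nl.2) nl.1 e) e with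
          | mk cs d2 =>
              rw [hq] at hr
              dsimp only at hr ⊢
              constructor
              · simp only [List.length_cons]
                omega
              · exact hr.2

lemma forkPopF_fuel_inv : ∀ (f1 f2 : Nat) (d : PySem.Dict Int (List Int)) (e : Int),
    d.keys.Nodup → pvDsize d ≤ f1 → pvDsize d ≤ f2 →
    forkPopF f1 d e = forkPopF f2 d e := by
  intro f1
  induction f1 with
  | zero =>
      intro f2 d e hnd h1 h2
      have hz : PySem.List.pop? (d.getD e []) = none := by
        have := getD_length_le_dsize d e
        have he : d.getD e [] = [] := by
          cases hh : d.getD e [] with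
          | nil => rfl
          | cons a l => rw [hh] at this; simp at this; omega
        rw [he]
        rfl
      cases f2 with
      | zero => rfl
      | succ g => rw [forkPopF, forkPopF, hz]
  | succ f ih =>
      intro f2 d e hnd h1 h2
      cases f2 with
      | zero =>
          have hz : PySem.List.pop? (d.getD e []) = none := by
            have := getD_length_le_dsize d e
            have he : d.getD e [] = [] := by
              cases hh : d.getD e [] with
              | nil => rfl
              | cons a l => rw [hh] at this; simp at this; omega
            rw [he]
            rfl
          rw [forkPopF, forkPopF, hz]
      | succ g =>
          rw [forkPopF, forkPopF]
          cases hp : PySem.List.pop? (d.getD e []) with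
          | none => rfl
          | some nl =>
              have hs := chain_step_facts d hnd e hp
              dsimp only
              rw [ih g _ e hs.2 (by omega) (by omega)]

-- === loopAF: fuel irrelevance ===

lemma loopAF_fuel_inv : ∀ (f1 f2 : Nat) (d : PySem.Dict Int (List Int))
    (stack : List (Int × Int)), d.keys.Nodup →
    pvDsize d + stack.length ≤ f1 → pvDsize d + stack.length ≤ f2 →
    loopAF f1 d stack = loopAF f2 d stack := by
  intro f1
  induction f1 with
  | zero =>
      intro f2 d stack hnd h1 h2
      have hs : stack = [] := by
        cases stack with
        | nil => rfl
        | cons a l => simp at h1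
      subst hs
      cases f2 with
      | zero => rfl
      | succ g => rw [loopAF, loopAF]
  | succ f ih =>
      intro f2 d stack hnd h1 h2
      cases stack with
      | nil =>
          cases f2 with
          | zero => rw [loopAF, loopAF]
          | succ g => rw [loopAF, loopAF]
      | cons tn rest =>
          cases f2 with
          | zero => simp at h2
          | succ g =>
              rw [loopAF, loopAF]
              simp only [List.length_cons] at h1 h2
              have hc1 : chainF (f + 1) d [tn.1] tn.2 = chainF (g + 1) d [tn.1] tn.2 :=
                chainF_fuel_inv _ _ d _ _ hnd (by omega) (by omega)
              have hcm := chainF_mono (g + 1) d [tn.1] tn.2 hnd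
              have hfm := forkPopF_mono (g + 1) (chainF (g + 1) d [tn.1] tn.2).2.2
                (chainF (g + 1) d [tn.1] tn.2).2.1 hcm.2
              have hf1 : forkPopF (f + 1) (chainF (g + 1) d [tn.1] tn.2).2.2
                  (chainF (g + 1) d [tn.1] tn.2).2.1
                  = forkPopF (g + 1) (chainF (g + 1) d [tn.1] tn.2).2.2
                  (chainF (g + 1) d [tn.1] tn.2).2.1 :=
                forkPopF_fuel_inv _ _ _ _ hcm.2 (by omega) (by omega)
              simp only [hc1, hf1]
              congr 1
              refine ih g _ _ hfm.2 ?_ ?_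
              · simp only [List.length_append, List.length_map, List.length_reverse]
                omega
              · simp only [List.length_append, List.length_map, List.length_reverse]
                omega

lemma loopAF_nil (f : Nat) (d : PySem.Dict Int (List Int)) :
    loopAF f d [] = [] := by
  cases f with
  | zero => rw [loopAF]
  | succ g => rw [loopAF]

-- === B's chain loop is A's chain loop on identical states ===

lemma bChain_eq_chainF : ∀ (fuel : Nat) (d : PySem.Dict Int (List Int)) (br : List Int)
    (v : Int), bChain fuel d br v = chainF fuel d br v := by
  intro fuel
  induction fuel with
  | zero => intro d br v; rfl
  | succ f ih =>
      intro d br v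
      rw [bChain, chainF]
      cases h : d.getD v [] with
      | nil => simp
      | cons a l =>
          cases l with
          | nil =>
              simp only [List.length_cons, List.length_nil, if_pos]
              have hp : PySem.List.pop? [a] = some (a, []) := by
                simp [PySem.List.pop?, PySem.List.pyIdx?]
              rw [hp]
              exact ih _ _ _
          | cons b t => simp

-- === bWalk / bFork: dsize monotonicity and Nodup preservation ===

lemma b_mono : ∀ (fuel : Nat),
    (∀ (d : PySem.Dict Int (List Int)) (t v : Int), d.keys.Nodup →
      pvDsize (bWalk fuel d t v).2 ≤ pvDsize d ∧ (bWalk fuel d t v).2.keys.Nodup) ∧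
    (∀ (d : PySem.Dict Int (List Int)) (e : Int), d.keys.Nodup →
      pvDsize (bFork fuel d e).2 ≤ pvDsize d ∧ (bFork fuel d e).2.keys.Nodup) := by
  intro fuel
  induction fuel with
  | zero =>
      exact ⟨fun d t v hnd => ⟨by rw [bWalk], by rw [bWalk]; exact hnd⟩,
        fun d e hnd => ⟨by rw [bFork], by rw [bFork]; exact hnd⟩⟩
  | succ f ih =>
      constructor
      · intro d t v hnd
        rw [bWalk, bChain_eq_chainF]
        have hcm := chainF_mono (f + 1) d [t] v hnd
        have hr := ih.2 (chainF (f + 1) d [t] v).2.2 (chainF (f + 1) d [t] v).2.1 hcm.2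
        exact ⟨by dsimp only; omega, by dsimp only; exact hr.2⟩
      · intro d e hnd
        rw [bFork]
        cases hp : PySem.List.pop? (d.getD e []) with
        | none => exact ⟨le_refl _, hnd⟩
        | some nl =>
            have hs := chain_step_facts d hnd e hp
            have hr := ih.2 (removeEdgeD (d.insert e nl.2) nl.1 e) e hs.2
            have hw := ih.1 (bFork f (removeEdgeD (d.insert e nl.2) nl.1 e) e).2 e nl.1 hr.2
            exact ⟨by dsimp only; omega, by dsimp only; exact hw.2⟩

-- === the bridge: A's stack machine equals B's mutual recursion ===

lemma loopAF_eq_bWalk : ∀ (n : Nat),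
    (∀ (d : PySem.Dict Int (List Int)) (t v : Int) (rest : List (Int × Int)) (fA fB : Nat),
      d.keys.Nodup →
      2 * pvDsize d + rest.length + 2 ≤ n →
      pvDsize d + rest.length + 1 ≤ fA →
      2 * pvDsize d + 1 ≤ fB →
      loopAF fA d ((t, v) :: rest)
        = (bWalk fB d t v).1 ++ loopAF fA (bWalk fB d t v).2 rest) ∧
    (∀ (d : PySem.Dict Int (List Int)) (e : Int) (rest : List (Int × Int)) (fA fB fF : Nat),
      d.keys.Nodup →
      2 * pvDsize d + rest.length + 1 ≤ n →
      pvDsize d + rest.length ≤ fA →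
      2 * pvDsize d ≤ fB →
      pvDsize d ≤ fF →
      loopAF fA (forkPopF fF d e).2 ((forkPopF fF d e).1.reverse.map (fun x => (e, x)) ++ rest)
        = (bFork fB d e).1 ++ loopAF fA (bFork fB d e).2 rest) := by
  intro n
  induction n using Nat.strong_induction_on with
  | _ n ih =>
    constructor
    · -- the (W) half
      intro d t v rest fA fB hnd hn hA hB
      obtain ⟨a, rfl⟩ : ∃ a, fA = a + 1 := ⟨fA - 1, by omega⟩
      obtain ⟨b, rfl⟩ : ∃ b, fB = b + 1 := ⟨fB - 1, by omega⟩
      rw [loopAF, bWalk, bChain_eq_chainF]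
      have hc1 : chainF (b + 1) d [t] v = chainF (a + 1) d [t] v :=
        chainF_fuel_inv _ _ d _ _ hnd (by omega) (by omega)
      rw [hc1]
      dsimp only
      have hcm := chainF_mono (a + 1) d [t] v hnd
      generalize hC : chainF (a + 1) d [t] v = C at *
      have hF := (ih (2 * pvDsize C.2.2 + rest.length + 1) (by omega)).2
        C.2.2 C.2.1 rest a b (a + 1) hcm.2 (le_refl _) (by omega) (by omega) (by omega)
      rw [hF]
      have hbm := (b_mono b).2 C.2.2 C.2.1 hcm.2
      have hl : loopAF a (bFork b C.2.2 C.2.1).2 rest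
          = loopAF (a + 1) (bFork b C.2.2 C.2.1).2 rest :=
        loopAF_fuel_inv _ _ _ _ hbm.2 (by omega) (by omega)
      rw [hl]
      simp
    · -- the (F) half
      intro d e rest fA fB fF hnd hn hA hB hF
      cases hp : PySem.List.pop? (d.getD e []) with
      | none =>
          have hfp : forkPopF fF d e = ([], d) := by
            cases fF with
            | zero => rw [forkPopF]
            | succ g => rw [forkPopF, hp]
          have hbf : bFork fB d e = ([], d) := by
            cases fB with
            | zero => rw [bFork]
            | succ g => rw [bFork, hp]
          rw [hfp, hbf]
          simp
      | some nl =>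
          have hlen := PySem.List.length_of_pop?_eq_some _ hp
          have hd1 : 1 ≤ pvDsize d := by
            have := getD_length_le_dsize d e
            omega
          obtain ⟨fF', rfl⟩ : ∃ g, fF = g + 1 := ⟨fF - 1, by omega⟩
          obtain ⟨fB', rfl⟩ : ∃ g, fB = g + 1 := ⟨fB - 1, by omega⟩
          have hs := chain_step_facts d hnd e hp
          rw [forkPopF, bFork, hp]
          dsimp only
          generalize hD1 : removeEdgeD (d.insert e nl.2) nl.1 e = d1 at *
          -- the recursive fork consumption
          have hIHF := (ih (2 * pvDsize d1 + rest.length + 2) (by omega)).2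
            d1 e ((e, nl.1) :: rest) fA fB' fF' hs.2
            (by simp only [List.length_cons]; omega)
            (by simp only [List.length_cons]; omega) (by omega) (by omega)
          cases hq : forkPopF fF' d1 e with
          | mk cs d2 =>
              rw [hq] at hIHF
              dsimp only at hIHF ⊢
              -- LHS stack shape: (nl.1 :: cs).reverse seeds = cs.reverse seeds then (e, nl.1)
              have hshape : ((nl.1 :: cs).reverse.map (fun x => (e, x)) ++ rest)
                  = (cs.reverse.map (fun x => (e, x)) ++ ((e, nl.1) :: rest)) := by
                simp
              rw [hshape, hIHF]
              -- then the walk of the popped child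
              have hbm := (b_mono fB').2 d1 e hs.2
              have hIHW := (ih (2 * pvDsize (bFork fB' d1 e).2 + rest.length + 2)
                  (by omega)).1
                (bFork fB' d1 e).2 e nl.1 rest fA fB' hbm.2 (le_refl _)
                (by omega) (by omega)
              rw [hIHW]
              simp

-- === the initial states coincide ===

lemma pvLeaves_head (d : PySem.Dict Int (List Int)) :
    bRoot d = (pvLeaves d).head? := by
  unfold bRoot pvLeaves
  rw [List.head?_map, List.head?_filter]

lemma ports_agree (E : List (Int × Int)) : extract_branches E = extract_branches_alt E := by
  unfold extract_branches extract_branches_alt initStateF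
  have hb : bBuild E PySem.Dict.empty = pvBuild E := by
    unfold pvBuild
    generalize PySem.Dict.empty = d
    induction E generalizing d with
    | nil => rfl
    | cons uv es ih => exact ih _
  rw [hb, pvLeaves_head]
  cases hfil : (pvBuild E).items.filter (fun kv => kv.2.length == 1) with
  | nil =>
      have : pvLeaves (pvBuild E) = [] := by unfold pvLeaves; rw [hfil]; rfl
      rw [this]
      rfl
  | cons kv tl =>
      obtain ⟨r, val⟩ := kv
      have hleq : pvLeaves (pvBuild E) = r :: tl.map (·.1) := by
        unfold pvLeaves; rw [hfil]; rfl
      rw [hleq]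
      dsimp only [List.head?]
      have hmem : (r, val) ∈ (pvBuild E).items := by
        have : (r, val) ∈ (pvBuild E).items.filter (fun kv => kv.2.length == 1) := by
          rw [hfil]; exact List.mem_cons_self
        exact List.mem_of_mem_filter this
      have hlen : val.length = 1 := by
        have : (r, val) ∈ (pvBuild E).items.filter (fun kv => kv.2.length == 1) := by
          rw [hfil]; exact List.mem_cons_self
        have := List.of_mem_filter this
        simpa using this
      obtain ⟨nv, rfl⟩ : ∃ nv, val = [nv] := by
        cases val with
        | nil => simp at hlen
        | cons a l =>
            cases l with
            | nil => exact ⟨a, rfl⟩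
            | cons b t => simp at hlen
      have hget : (pvBuild E).getD r [] = [nv] :=
        PySem.Dict.getD_of_mem_items (pvBuild E) hmem (nodup_keys_build E) []
      rw [hget]
      have hpop : PySem.List.pop? [nv] = some (nv, []) := by
        simp [PySem.List.pop?, PySem.List.pyIdx?]
      rw [hpop]
      dsimp only
      generalize hD1 : removeEdgeD ((pvBuild E).insert r []) nv r = D1
      have hnd1 : D1.keys.Nodup := by
        rw [← hD1]
        exact nodup_removeEdgeD _ _ _
          (PySem.Dict.nodup_keys_insert _ _ _ (nodup_keys_build E))
      have hW := (loopAF_eq_bWalk (2 * pvDsize D1 + 2)).1 D1 r nv []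
        (pvDsize D1 + 1) (2 * pvDsize D1 + 1) hnd1 (by simp) (by simp) (by omega)
      rw [hW, loopAF_nil, List.append_nil]

-- ===== VERDICT (by name: the statement is the Claim_ definition above) =====
theorem extract_branches_spec : Claim_equal_extract_branches := by
  intro E _ _
  unfold Spec_extract_branches
  exact ports_agree E
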